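-- pv_equiv track=rewrite | github.com/mfzorlu/CP-Contest-Templates | basics/coin_problem.py | coin_change_exact_k
-- ===== SOURCE A (Python) =====
-- from typing import List, Tuple
--
-- def coin_change_exact_k(coins: List[int], amount: int, k: int) -> bool:
--     """
--     Check if we can make amount using EXACTLY k coins
--     Returns: True if possible, False otherwise
--     Time: O(amount * k * len(coins)), Space: O(amount * k)
--     """
--     # dp[i][j] = can we make amount i using exactly j coins?
--     dp = [[False] * (k + 1) for _ in range(amount + 1)]
--     dp[0][0] = True
--
--     for i in range(amount + 1):
--         for j in range(k):
--             if dp[i][j]: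
--                 for coin in coins:
--                     if i + coin <= amount:
--                         dp[i + coin][j + 1] = True
--
--     return dp[amount][k]
-- ===== SOURCE B (Python) =====
-- from typing import List
--
-- def coin_change_exact_k(coins: List[int], amount: int, k: int) -> bool:
--     """Layered reachability: the set of amounts makeable with exactly j coins,
--     for j = 0..k; answer is whether amount is in the k-th layer."""
--     reach = {0}
--     for _ in range(k):
--         reach = {a + c for a in reach for c in coins if a + c <= amount}
--     return amount in reach
-- ===== Notes on version B (the rewrite author's own statement) =====
-- stated objective: alternative
-- what changed: Replaces the forward-filling 2D boolean table dp[amount+1][k+1] by a layered breadth-first reachability: a 1-D set of amounts makeable with exactly j coins is rebuilt k times, so no table and no per-cell scan remain; Pre_ excludes negative amount/k (A raises IndexError) and, when k >= 1 so the coin loop runs, coin lists containing a negative coin, where A either raises or its value comes from Python negative-index wraparound into the dp table.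
-- outside the precondition, e.g. on coin_change_exact_k([-1], 0, 1): A returns True, B returns False
import Mathlib
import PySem

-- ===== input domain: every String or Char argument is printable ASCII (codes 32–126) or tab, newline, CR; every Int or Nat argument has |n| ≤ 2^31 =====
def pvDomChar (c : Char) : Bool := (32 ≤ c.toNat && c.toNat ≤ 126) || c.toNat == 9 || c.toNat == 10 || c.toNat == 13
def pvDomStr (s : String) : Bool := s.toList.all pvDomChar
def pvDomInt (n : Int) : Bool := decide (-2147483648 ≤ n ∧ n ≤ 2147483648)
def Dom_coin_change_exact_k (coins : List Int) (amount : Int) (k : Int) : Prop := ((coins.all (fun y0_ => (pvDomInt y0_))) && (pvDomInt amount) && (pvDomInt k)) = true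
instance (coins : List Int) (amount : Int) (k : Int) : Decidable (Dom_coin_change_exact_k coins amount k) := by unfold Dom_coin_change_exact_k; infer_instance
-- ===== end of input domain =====

-- B replaces A's forward-filled 2D table by a layered 1-D reachability set rebuilt k times
-- (objective: alternative decomposition of the same computation).

-- ===== PORT A =====
-- dp[i][j] read / write, Python indexing (exact on the nonnegative in-range indices Pre_ admits)
def pvDpGet (dp : List (List Bool)) (i j : Int) : Bool :=
  PySem.List.pyGetD (PySem.List.pyGetD dp i []) j false

def pvDpSet (dp : List (List Bool)) (i j : Int) : List (List Bool) :=
  PySem.List.pySetD dp i (PySem.List.pySetD (PySem.List.pyGetD dp i []) j true)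

def coin_change_exact_k (coins : List Int) (amount : Int) (k : Int) : Bool :=
  -- dp = [[False] * (k + 1) for _ in range(amount + 1)]; dp[0][0] = True
  let dp0 : List (List Bool) :=
    List.replicate (amount + 1).toNat (List.replicate (k + 1).toNat false)
  let dp1 := pvDpSet dp0 0 0
  -- for i in range(amount + 1): for j in range(k): if dp[i][j]: for coin in coins: …
  let dp2 := (PySem.List.pyRange 0 (amount + 1) 1).foldl (fun dp i =>
      (PySem.List.pyRange 0 k 1).foldl (fun dp j =>
        if pvDpGet dp i j then
          coins.foldl (fun dp coin =>
            if i + coin ≤ amount then pvDpSet dp (i + coin) (j + 1) else dp) dp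
        else dp) dp) dp1
  pvDpGet dp2 amount k

-- ===== PORT B =====
-- reach = {a + c for a in reach for c in coins if a + c <= amount}
def pvStep (coins : List Int) (amount : Int) (r : List Int) : List Int :=
  PySem.Set.ofList (r.flatMap (fun a =>
    coins.filterMap (fun c => if a + c ≤ amount then some (a + c) else none)))

def coin_change_exact_k_alt (coins : List Int) (amount : Int) (k : Int) : Bool :=
  let reach0 : PySem.Set Int := PySem.Set.ofList [0]
  let reach := (PySem.List.pyRange 0 k 1).foldl
    (fun r _ => pvStep coins amount r) reach0
  PySem.Set.contains reach amount

-- ===== PRECONDITION & SPEC =====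
-- Pre_ excludes negative amount/k, on which A raises IndexError, and (when k ≥ 1, so the coin
-- loop runs) coin lists containing a negative coin, on which A either raises or returns an
-- accidental value produced by Python negative-index wraparound into the dp table; coins are
-- non-negative in the problem's domain.
def Pre_coin_change_exact_k (coins : List Int) (amount : Int) (k : Int) : Prop :=
  0 ≤ amount ∧ 0 ≤ k ∧ (k = 0 ∨ ∀ c ∈ coins, 0 ≤ c)
instance (coins : List Int) (amount : Int) (k : Int) : Decidable (Pre_coin_change_exact_k coins amount k) := by unfold Pre_coin_change_exact_k; infer_instance

def pvWitness_coin_change_exact_k : List Int × Int × Int := ([1, 2], 3, 2)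

def Spec_coin_change_exact_k (coins : List Int) (amount : Int) (k : Int) (out : Bool) : Prop := out = coin_change_exact_k_alt coins amount k
instance (coins : List Int) (amount : Int) (k : Int) (out : Bool) : Decidable (Spec_coin_change_exact_k coins amount k out) := by unfold Spec_coin_change_exact_k; infer_instance

-- ===== CLAIM (what is proved, stated in full; the proofs are below) =====
def Claim_equal_coin_change_exact_k : Prop := ∀ (coins : List Int) (amount : Int) (k : Int), Dom_coin_change_exact_k coins amount k → Pre_coin_change_exact_k coins amount k → Spec_coin_change_exact_k coins amount k (coin_change_exact_k coins amount k)

-- ===== LEMMAS AND PROOFS =====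

-- makeable: pvSpec coins amount j x ↔ x is a sum of exactly j coins, every partial sum ≤ amount
def pvSpec (coins : List Int) (amount : Int) : Nat → Int → Prop
  | 0, x => x = 0
  | j + 1, x => ∃ c ∈ coins, ∃ a, pvSpec coins amount j a ∧ a + c = x ∧ x ≤ amount

lemma pvSpec_bounds {coins : List Int} {amount : Int}
    (hc : ∀ c ∈ coins, 0 ≤ c) (ha : 0 ≤ amount) :
    ∀ j x, pvSpec coins amount j x → 0 ≤ x ∧ x ≤ amount := by
  intro j
  induction j with
  | zero => intro x hx; simp [pvSpec] at hx; omega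
  | succ m ih =>
    rintro x ⟨c, hcmem, a, hspec, hsum, hle⟩
    have := ih a hspec
    have := hc c hcmem
    omega

-- ---------- B side ----------
lemma pv_mem_pvStep {coins : List Int} {amount : Int} {r : List Int} {x : Int} :
    x ∈ pvStep coins amount r ↔ ∃ a ∈ r, ∃ c ∈ coins, a + c ≤ amount ∧ x = a + c := by
  simp only [pvStep, PySem.Set.mem_ofList, List.mem_flatMap, List.mem_filterMap]
  constructor
  · rintro ⟨a, har, c, hcc, hif⟩
    split at hif
    · exact ⟨a, har, c, hcc, by assumption, by simpa using hif.symm⟩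
    · simp at hif
  · rintro ⟨a, har, c, hcc, hle, rfl⟩
    exact ⟨a, har, c, hcc, by simp [hle]⟩

def pvReach (coins : List Int) (amount : Int) : Nat → List Int
  | 0 => PySem.Set.ofList [0]
  | n + 1 => pvStep coins amount (pvReach coins amount n)

lemma pv_mem_pvReach {coins : List Int} {amount : Int} :
    ∀ n x, x ∈ pvReach coins amount n ↔ pvSpec coins amount n x := by
  intro n
  induction n with
  | zero => intro x; simp [pvReach, pvSpec, PySem.Set.mem_ofList]
  | succ m ih =>
    intro x
    rw [pvReach, pv_mem_pvStep]
    constructor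
    · rintro ⟨a, har, c, hcc, hle, rfl⟩
      exact ⟨c, hcc, a, (ih a).1 har, rfl, hle⟩
    · rintro ⟨c, hcc, a, hspec, rfl, hle⟩
      exact ⟨a, (ih a).2 hspec, c, hcc, hle, rfl⟩

lemma pvB_iff {coins : List Int} {amount k : Int} :
    coin_change_exact_k_alt coins amount k = true ↔ pvSpec coins amount k.toNat amount := by
  show (PySem.Set.contains ((PySem.List.pyRange 0 k 1).foldl
      (fun r _ => pvStep coins amount r) (PySem.Set.ofList [0])) amount) = true ↔ _
  rw [List.foldl_const]
  have hlen : (PySem.List.pyRange 0 k 1).length = k.toNat := by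
    simp
  have hiter : ∀ n, (pvStep coins amount)^[n] (PySem.Set.ofList [0]) = pvReach coins amount n := by
    intro n
    induction n with
    | zero => rfl
    | succ m ih => rw [Function.iterate_succ_apply', ih]; rfl
  rw [hlen, hiter, PySem.Set.contains_iff, pv_mem_pvReach]

-- ---------- A side ----------
def pvShape (amount k : Int) (dp : List (List Bool)) : Prop :=
  dp.length = (amount + 1).toNat ∧ ∀ row ∈ dp, row.length = (k + 1).toNat

def pvMget (dp : List (List Bool)) (x y : Nat) : Bool := (dp.getD x []).getD y false

def pvMset (dp : List (List Bool)) (x y : Nat) : List (List Bool) :=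
  dp.set x ((dp.getD x []).set y true)

lemma pvDpGet_nonneg (dp : List (List Bool)) {i j : Int} (hi : 0 ≤ i) (hj : 0 ≤ j) :
    pvDpGet dp i j = pvMget dp i.toNat j.toNat := by
  simp [pvDpGet, pvMget, PySem.List.pyGetD_of_nonneg _ _ hi, PySem.List.pyGetD_of_nonneg _ _ hj]

lemma pvDpSet_nonneg (dp : List (List Bool)) {i j : Int} (hi : 0 ≤ i) (hj : 0 ≤ j) :
    pvDpSet dp i j = pvMset dp i.toNat j.toNat := by
  simp [pvDpSet, pvMset, PySem.List.pyGetD_of_nonneg _ _ hi,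
    PySem.List.pySetD_of_nonneg _ _ hi, PySem.List.pySetD_of_nonneg _ _ hj]

lemma pvShape_pvMset {amount k : Int} {dp : List (List Bool)} (hs : pvShape amount k dp)
    (i j : Nat) : pvShape amount k (pvMset dp i j) := by
  obtain ⟨hlen, hrows⟩ := hs
  by_cases hi : i < dp.length
  · refine ⟨by simp [pvMset, hlen], ?_⟩
    intro row hrow
    rcases List.mem_or_eq_of_mem_set hrow with h | rfl
    · exact hrows row h
    · have hg : dp.getD i [] = dp[i] := by
        simp [List.getD_eq_getElem?_getD, List.getElem?_eq_getElem hi]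
      rw [List.length_set, hg]
      exact hrows _ (List.getElem_mem hi)
  · have hnoop : pvMset dp i j = dp := by
      unfold pvMset; exact List.set_eq_of_length_le (by omega)
    rw [hnoop]; exact ⟨hlen, hrows⟩

lemma pvMget_pvMset {amount k : Int} {dp : List (List Bool)} (hs : pvShape amount k dp)
    {i j : Nat} (hi : i < (amount + 1).toNat) (hj : j < (k + 1).toNat) (x y : Nat) :
    pvMget (pvMset dp i j) x y = if x = i ∧ y = j then true else pvMget dp x y := by
  obtain ⟨hlen, hrows⟩ := hs
  have hilen : i < dp.length := by omega
  have hgi : dp.getD i [] = dp[i] := by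
    simp [List.getD_eq_getElem?_getD, List.getElem?_eq_getElem hilen]
  have hrowlen : dp[i].length = (k + 1).toNat := hrows _ (List.getElem_mem hilen)
  by_cases hxi : x = i
  · subst hxi
    by_cases hyj : y = j
    · subst hyj
      simp [pvMget, pvMset, List.getD_eq_getElem?_getD, hilen, hrowlen, hj]
    · simp [pvMget, pvMset, List.getD_eq_getElem?_getD, hilen, hyj,
        (show ¬ j = y from fun h => hyj h.symm)]
  · simp [pvMget, pvMset, List.getD_eq_getElem?_getD, hxi,
      (show ¬ i = x from fun h => hxi h.symm)]

-- the set of dp-cells guaranteed correct after the loops have processed all states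
-- lexicographically below (t, s)
def pvInv (coins : List Int) (amount k t s : Int) (dp : List (List Bool)) : Prop :=
  pvShape amount k dp ∧
  pvMget dp 0 0 = true ∧
  (∀ x y : Nat, (x : Int) ≤ amount → (y : Int) ≤ k →
      pvMget dp x y = true → pvSpec coins amount y x) ∧
  (∀ x y : Nat, (x : Int) ≤ amount → 1 ≤ y → (y : Int) ≤ k →
      (∃ c ∈ coins, ∃ a : Int, pvSpec coins amount (y - 1) a ∧ a + c = (x : Int) ∧
        (a < t ∨ (a = t ∧ (y : Int) - 1 < s))) → pvMget dp x y = true)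

lemma pvInv_imp {coins : List Int} {amount k t s t' s' : Int} {dp : List (List Bool)}
    (h : ∀ (a : Int) (y : Nat), 1 ≤ y → (y : Int) ≤ k →
        (a < t' ∨ (a = t' ∧ (y : Int) - 1 < s')) → (a < t ∨ (a = t ∧ (y : Int) - 1 < s)))
    (hinv : pvInv coins amount k t s dp) : pvInv coins amount k t' s' dp := by
  obtain ⟨h1, h2, h3, h4⟩ := hinv
  refine ⟨h1, h2, h3, ?_⟩
  rintro x y hx hy1 hyk ⟨c, hcc, a, hspec, hsum, hlex⟩
  exact h4 x y hx hy1 hyk ⟨c, hcc, a, hspec, hsum, h a y hy1 hyk hlex⟩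

-- at visit time, a makeable processed-state is already marked
lemma pvVisit {coins : List Int} {amount k t s : Int} {dp : List (List Bool)}
    (hc : ∀ c ∈ coins, 0 ≤ c) (ha : 0 ≤ amount)
    (hinv : pvInv coins amount k t s dp)
    (ht0 : 0 ≤ t) (hta : t ≤ amount) {s' : Nat} (hs' : (s' : Int) = s) (hsk : s ≤ k)
    (hspec : pvSpec coins amount s' t) : pvMget dp t.toNat s' = true := by
  obtain ⟨h1, h2, h3, h4⟩ := hinv
  match s', hspec with
  | 0, hspec =>
    have : t = 0 := hspec
    subst this; simpa using h2
  | m + 1, ⟨c, hcc, a, hspeca, hsum, hle⟩ =>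
    have hcpos := hc c hcc
    have hab := pvSpec_bounds hc ha m a hspeca
    refine h4 t.toNat (m + 1) (by omega) (by omega) (by omega) ?_
    refine ⟨c, hcc, a, by simpa using hspeca, by omega, ?_⟩
    rcases lt_or_eq_of_le (show a ≤ t by omega) with h | h
    · exact Or.inl h
    · exact Or.inr ⟨h, by push_cast; omega⟩

-- the innermost fold over coins: marks exactly the successors of (t, s)
lemma pvCoinsFold {amount k t s : Int}
    (ha : 0 ≤ amount) (hk : 0 ≤ k)
    (ht0 : 0 ≤ t) (_hta : t ≤ amount) (hs0 : 0 ≤ s) (hsk : s < k) :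
    ∀ (cs : List Int) (dp : List (List Bool)), (∀ c ∈ cs, 0 ≤ c) → pvShape amount k dp →
      pvShape amount k (cs.foldl (fun dp coin =>
          if t + coin ≤ amount then pvDpSet dp (t + coin) (s + 1) else dp) dp) ∧
      (∀ x y : Nat, pvMget (cs.foldl (fun dp coin =>
          if t + coin ≤ amount then pvDpSet dp (t + coin) (s + 1) else dp) dp) x y = true ↔
        (pvMget dp x y = true ∨
          ∃ c ∈ cs, t + c ≤ amount ∧ (x : Int) = t + c ∧ (y : Int) = s + 1)) := by
  intro cs
  induction cs with
  | nil => intro dp _ hs; exact ⟨hs, by simp⟩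
  | cons c cs ih =>
    intro dp hcs hs
    have hc0 : 0 ≤ c := hcs c (List.mem_cons_self)
    have hcs' : ∀ c ∈ cs, 0 ≤ c := fun c h => hcs c (List.mem_cons_of_mem _ h)
    by_cases hle : t + c ≤ amount
    · have hset : pvDpSet dp (t + c) (s + 1) = pvMset dp (t + c).toNat (s + 1).toNat :=
        pvDpSet_nonneg dp (by omega) (by omega)
      have hs2 : pvShape amount k (pvMset dp (t + c).toNat (s + 1).toNat) :=
        pvShape_pvMset hs _ _
      have hupdate := pvMget_pvMset hs
        (i := (t + c).toNat) (j := (s + 1).toNat) (by omega) (by omega)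
      obtain ⟨hsh, hiff⟩ := ih (pvMset dp (t + c).toNat (s + 1).toNat) hcs' hs2
      simp only [List.foldl_cons, if_pos hle, hset]
      refine ⟨hsh, fun x y => ?_⟩
      rw [hiff x y, hupdate x y]
      constructor
      · rintro (h | h)
        · split_ifs at h with hxy
          · exact Or.inr ⟨c, List.mem_cons_self, hle, by omega, by omega⟩
          · exact Or.inl h
        · obtain ⟨c', hc', h1, h2, h3⟩ := h
          exact Or.inr ⟨c', List.mem_cons_of_mem _ hc', h1, h2, h3⟩
      · rintro (h | ⟨c', hc', h1, h2, h3⟩)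
        · left; split_ifs with hxy; · rfl
          · exact h
        · rcases List.mem_cons.1 hc' with rfl | hmem
          · left; rw [if_pos (by omega)]
          · exact Or.inr ⟨c', hmem, h1, h2, h3⟩
    · simp only [List.foldl_cons, if_neg hle]
      obtain ⟨hsh, hiff⟩ := ih dp hcs' hs
      refine ⟨hsh, fun x y => ?_⟩
      rw [hiff x y]
      constructor
      · rintro (h | ⟨c', hc', h1, h2, h3⟩)
        · exact Or.inl h
        · exact Or.inr ⟨c', List.mem_cons_of_mem _ hc', h1, h2, h3⟩
      · rintro (h | ⟨c', hc', h1, h2, h3⟩)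
        · exact Or.inl h
        · rcases List.mem_cons.1 hc' with rfl | hmem
          · omega
          · exact Or.inr ⟨c', hmem, h1, h2, h3⟩

-- one inner-loop step at state (t, s)
lemma pvInnerStep {coins : List Int} {amount k t s : Int} {dp : List (List Bool)}
    (hc : ∀ c ∈ coins, 0 ≤ c) (ha : 0 ≤ amount) (hk : 0 ≤ k)
    (ht0 : 0 ≤ t) (hta : t ≤ amount) (hs0 : 0 ≤ s) (hsk : s < k)
    (hinv : pvInv coins amount k t s dp) :
    pvInv coins amount k t (s + 1)
      (if pvDpGet dp t s then
        coins.foldl (fun dp coin =>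
          if t + coin ≤ amount then pvDpSet dp (t + coin) (s + 1) else dp) dp
      else dp) := by
  have hget : pvDpGet dp t s = pvMget dp t.toNat s.toNat := pvDpGet_nonneg dp ht0 hs0
  obtain ⟨h1, h2, h3, h4⟩ := hinv
  by_cases hvis : pvDpGet dp t s = true
  · rw [if_pos hvis]
    have hspec_t : pvSpec coins amount s.toNat t := by
      have := h3 t.toNat s.toNat (by omega) (by omega) (by rwa [hget] at hvis)
      simpa [Int.toNat_of_nonneg ht0] using this
    obtain ⟨hsh, hiff⟩ := pvCoinsFold ha hk ht0 hta hs0 hsk coins dp hc h1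
    refine ⟨hsh, ?_, ?_, ?_⟩
    · rw [hiff]; exact Or.inl h2
    · intro x y hx hy hm
      rcases (hiff x y).1 hm with h | ⟨c', hc', hle, hxeq, hyeq⟩
      · exact h3 x y hx hy h
      · have hy' : y = s.toNat + 1 := by omega
        subst hy'
        exact ⟨c', hc', t, hspec_t, by omega, by omega⟩
    · rintro x y hx hy1 hyk ⟨c', hc', a, hspeca, hsum, hlex⟩
      rw [hiff]
      rcases hlex with h | ⟨rfl, hlt⟩
      · exact Or.inl (h4 x y hx hy1 hyk ⟨c', hc', a, hspeca, hsum, Or.inl h⟩)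
      · by_cases hold : (y : Int) - 1 < s
        · exact Or.inl (h4 x y hx hy1 hyk ⟨c', hc', a, hspeca, hsum, Or.inr ⟨rfl, hold⟩⟩)
        · have hyeq : (y : Int) = s + 1 := by omega
          exact Or.inr ⟨c', hc', by omega, by omega, hyeq⟩
  · rw [if_neg hvis]
    refine ⟨h1, h2, h3, ?_⟩
    rintro x y hx hy1 hyk ⟨c', hc', a, hspeca, hsum, hlex⟩
    rcases hlex with h | ⟨rfl, hlt⟩
    · exact h4 x y hx hy1 hyk ⟨c', hc', a, hspeca, hsum, Or.inl h⟩
    · by_cases hold : (y : Int) - 1 < s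
      · exact h4 x y hx hy1 hyk ⟨c', hc', a, hspeca, hsum, Or.inr ⟨rfl, hold⟩⟩
      · -- (y-1) = s : then (t, s) is makeable, so dp[t][s] would have been true
        exfalso
        have hyeq : ((y - 1 : Nat) : Int) = s := by omega
        have := pvVisit hc ha ⟨h1, h2, h3, h4⟩ ht0 hta hyeq (by omega)
          (by exact hspeca)
        rw [hget] at hvis
        have hsnat : s.toNat = y - 1 := by omega
        rw [hsnat] at hvis
        simp [this] at hvis

-- the inner fold over j ∈ range(s, k)
lemma pvInnerFold {coins : List Int} {amount k t : Int}
    (hc : ∀ c ∈ coins, 0 ≤ c) (ha : 0 ≤ amount) (hk : 0 ≤ k)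
    (ht0 : 0 ≤ t) (hta : t ≤ amount) :
    ∀ (n : Nat) (s : Int) (dp : List (List Bool)), (k - s).toNat = n → 0 ≤ s →
      pvInv coins amount k t s dp →
      pvInv coins amount k t k ((PySem.List.pyRange s k 1).foldl (fun dp j =>
        if pvDpGet dp t j then
          coins.foldl (fun dp coin =>
            if t + coin ≤ amount then pvDpSet dp (t + coin) (j + 1) else dp) dp
        else dp) dp) := by
  intro n
  induction n with
  | zero =>
    intro s dp hn hs0 hinv
    have hks : k ≤ s := by omega
    rw [PySem.List.pyRange_one_eq_nil hks]
    exact pvInv_imp (fun a y _ _ h => by omega) hinv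
  | succ m ih =>
    intro s dp hn hs0 hinv
    have hsk : s < k := by omega
    rw [PySem.List.pyRange_one_cons hsk, List.foldl_cons]
    exact ih (s + 1) _ (by omega) (by omega)
      (pvInnerStep hc ha hk ht0 hta hs0 hsk hinv)

-- the outer fold over i ∈ range(t, amount + 1)
lemma pvOuterFold {coins : List Int} {amount k : Int}
    (hc : ∀ c ∈ coins, 0 ≤ c) (ha : 0 ≤ amount) (hk : 0 ≤ k) :
    ∀ (n : Nat) (t : Int) (dp : List (List Bool)), (amount + 1 - t).toNat = n → 0 ≤ t →
      pvInv coins amount k t 0 dp →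
      pvInv coins amount k (amount + 1) 0 ((PySem.List.pyRange t (amount + 1) 1).foldl (fun dp i =>
        (PySem.List.pyRange 0 k 1).foldl (fun dp j =>
          if pvDpGet dp i j then
            coins.foldl (fun dp coin =>
              if i + coin ≤ amount then pvDpSet dp (i + coin) (j + 1) else dp) dp
          else dp) dp) dp) := by
  intro n
  induction n with
  | zero =>
    intro t dp hn ht0 hinv
    have hta : amount + 1 ≤ t := by omega
    rw [PySem.List.pyRange_one_eq_nil hta]
    exact pvInv_imp (fun a y hy1 hyk h => by omega) hinv
  | succ m ih =>
    intro t dp hn ht0 hinv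
    have hta : t ≤ amount := by omega
    rw [PySem.List.pyRange_one_cons (a := t) (b := amount + 1) (by omega), List.foldl_cons]
    have hstep := pvInnerFold hc ha hk ht0 hta (k - 0).toNat 0 dp rfl le_rfl hinv
    refine ih (t + 1) _ (by omega) (by omega) ?_
    refine pvInv_imp (fun a y hy1 hyk h => ?_) hstep
    -- from processed-set "below (t+1, 0)" to "below (t, k)"
    rcases h with h | ⟨rfl, hlt⟩
    · rcases lt_or_eq_of_le (show a ≤ t by omega) with h' | rfl
      · exact Or.inl h'
      · exact Or.inr ⟨rfl, by omega⟩
    · omega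

lemma pvMget_dp0 {amount k : Int} (x y : Nat) :
    pvMget (List.replicate (amount + 1).toNat (List.replicate (k + 1).toNat false)) x y = false := by
  unfold pvMget
  rcases lt_or_ge x (amount + 1).toNat with hx | hx
  · rw [List.getD_replicate _ hx]
    rcases lt_or_ge y (k + 1).toNat with hy | hy
    · rw [List.getD_replicate _ hy]
    · exact List.getD_eq_default _ _ (by simpa using hy)
  · rw [show (List.replicate (amount + 1).toNat (List.replicate (k + 1).toNat false)).getD x []
        = [] from List.getD_eq_default _ _ (by simpa using hx)]
    rfl

lemma pvA_iff {coins : List Int} {amount k : Int}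
    (ha : 0 ≤ amount) (hk : 0 ≤ k) (hc : ∀ c ∈ coins, 0 ≤ c) :
    coin_change_exact_k coins amount k = true ↔ pvSpec coins amount k.toNat amount := by
  have hshape0 : pvShape amount k
      (List.replicate (amount + 1).toNat (List.replicate (k + 1).toNat false)) := by
    constructor
    · simp
    · intro row hrow
      rw [List.eq_of_mem_replicate hrow]; simp
  have hset1 : pvDpSet (List.replicate (amount + 1).toNat (List.replicate (k + 1).toNat false))
      0 0 = pvMset (List.replicate (amount + 1).toNat (List.replicate (k + 1).toNat false))
      0 0 := by simpa using pvDpSet_nonneg _ (le_rfl : (0:Int) ≤ 0) (le_rfl : (0:Int) ≤ 0)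
  have hupd := pvMget_pvMset hshape0 (i := 0) (j := 0) (by omega) (by omega)
  have hinv1 : pvInv coins amount k 0 0
      (pvDpSet (List.replicate (amount + 1).toNat (List.replicate (k + 1).toNat false)) 0 0) := by
    rw [hset1]
    refine ⟨pvShape_pvMset hshape0 _ _, ?_, ?_, ?_⟩
    · rw [hupd 0 0]; simp
    · intro x y hx hy hm
      rw [hupd x y] at hm
      split_ifs at hm with hxy
      · obtain ⟨rfl, rfl⟩ := hxy
        show pvSpec coins amount 0 ((0 : Nat) : Int)
        simp [pvSpec]
      · rw [pvMget_dp0] at hm; exact absurd hm (by simp)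
    · rintro x y hx hy1 hyk ⟨c, hcc, a, hspeca, hsum, hlex⟩
      have hab := pvSpec_bounds hc ha (y - 1) a hspeca
      rcases hlex with h | ⟨rfl, hlt⟩
      · omega
      · omega
  have hfinal := pvOuterFold hc ha hk (amount + 1 - 0).toNat 0 _ rfl le_rfl hinv1
  obtain ⟨hf1, hf2, hf3, hf4⟩ := hfinal
  show pvDpGet _ amount k = true ↔ _
  rw [pvDpGet_nonneg _ ha hk]
  constructor
  · intro hm
    have := hf3 amount.toNat k.toNat (by omega) (by omega) hm
    simpa [Int.toNat_of_nonneg ha] using this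
  · intro hspec
    match hkn : k.toNat, hspec with
    | 0, hspec =>
      have h0 : amount = 0 := hspec
      subst h0
      simpa using hf2
    | m + 1, hspec =>
      obtain ⟨c, hcc, a, hspeca, hsum, hle⟩ := hspec
      have hab := pvSpec_bounds hc ha m a hspeca
      refine hf4 amount.toNat (m + 1) (by omega) (by omega) (by omega) ?_
      exact ⟨c, hcc, a, by simpa using hspeca, by omega, Or.inl (by omega)⟩

-- with k = 0 neither loop body runs: both programs reduce to (amount == 0)
lemma pvK0 {coins : List Int} {amount : Int} (ha : 0 ≤ amount) :
    coin_change_exact_k coins amount 0 = coin_change_exact_k_alt coins amount 0 := by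
  have hshape0 : pvShape amount 0
      (List.replicate (amount + 1).toNat (List.replicate ((0 : Int) + 1).toNat false)) := by
    constructor
    · simp
    · intro row hrow
      rw [List.eq_of_mem_replicate hrow]; simp
  have hset1 : pvDpSet (List.replicate (amount + 1).toNat
        (List.replicate ((0 : Int) + 1).toNat false)) 0 0
      = pvMset (List.replicate (amount + 1).toNat
        (List.replicate ((0 : Int) + 1).toNat false)) 0 0 := by
    simpa using pvDpSet_nonneg _ (le_rfl : (0:Int) ≤ 0) (le_rfl : (0:Int) ≤ 0)
  rw [Bool.eq_iff_iff]
  simp only [coin_change_exact_k, coin_change_exact_k_alt]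
  rw [PySem.List.pyRange_one_eq_nil (le_rfl : (0:Int) ≤ 0)]
  simp only [List.foldl_nil, List.foldl_fixed]
  rw [pvDpGet_nonneg _ ha le_rfl, hset1,
    pvMget_pvMset hshape0 (by omega) (by omega) amount.toNat (0 : Int).toNat]
  rw [PySem.Set.contains_iff, PySem.Set.mem_ofList]
  constructor
  · intro h
    split_ifs at h with hc
    · obtain ⟨hc1, -⟩ := hc
      have : amount = 0 := by omega
      simp [this]
    · rw [pvMget_dp0] at h; exact absurd h (by simp)
  · intro h
    have h0 : amount = 0 := by simpa using h
    subst h0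
    simp
-- ===== VERDICT (by name: the statement is the Claim_ definition above) =====
theorem coin_change_exact_k_spec : Claim_equal_coin_change_exact_k := by
  intro coins amount k _hdom hpre
  obtain ⟨ha, hk, hco⟩ := hpre
  unfold Spec_coin_change_exact_k
  rcases hco with rfl | hc
  · exact pvK0 ha
  · rw [Bool.eq_iff_iff, pvA_iff ha hk hc, pvB_iff]
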